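-- pv_equiv track=rewrite | github.com/yoshida77/atcoder_tdd_python | abc216/C/many_balls.py | many_balls
-- ===== SOURCE A (Python) =====
-- def many_balls(n):
--     list_magic = []
--     while n > 0:
--         if n % 2 == 1:
--             n -= 1
--             list_magic.append("A")
--         else:
--             n = n // 2 # 型のためWA
--             list_magic.append("B")
--
--     list_magic = list_magic[::-1]
--     return ''.join(list_magic)
-- ===== SOURCE B (Python) =====
-- def many_balls(n):
--     if n <= 0:
--         return ''
--     s = bin(n)[2:]
--     res = ['A']
--     for b in s[1:]:
--         res.append('B')
--         if b == '1':
--             res.append('A')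
--     return ''.join(res)
-- ===== Notes on version B (the rewrite author's own statement) =====
-- stated objective: idiomatic
-- what changed: Replaces A's LSB-first destructive while loop (mutating n, appending ops, then reversing) by precomputing bin(n) and one MSB-first forward pass over its digits, with no reversal.
import Mathlib
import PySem

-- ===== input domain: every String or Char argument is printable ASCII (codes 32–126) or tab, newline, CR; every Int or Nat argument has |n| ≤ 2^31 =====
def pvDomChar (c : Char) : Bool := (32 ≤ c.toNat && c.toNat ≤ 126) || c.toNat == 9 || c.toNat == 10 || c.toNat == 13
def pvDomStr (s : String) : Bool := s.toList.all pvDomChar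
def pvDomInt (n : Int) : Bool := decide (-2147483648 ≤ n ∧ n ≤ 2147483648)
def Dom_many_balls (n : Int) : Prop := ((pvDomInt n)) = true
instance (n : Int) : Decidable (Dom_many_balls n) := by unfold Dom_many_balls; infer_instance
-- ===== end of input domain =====

-- B replaces A's LSB-first destructive while loop + final reversal by one MSB-first
-- forward pass over the precomputed binary digits (objective: simpler/idiomatic).

-- ===== PORT A =====
-- the while loop: state is (n, list_magic)
def aLoop (n : Int) (acc : List String) : List String :=
  if 0 < n then
    if PySem.Int.mod n 2 == 1 then aLoop (n - 1) (acc ++ ["A"])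
    else aLoop (PySem.Int.floordiv n 2) (acc ++ ["B"])
  else acc
termination_by n.toNat
decreasing_by
  · omega
  · rw [PySem.Int.floordiv_eq_ediv_of_pos (by omega)]; omega

def many_balls (n : Int) : String :=
  String.join ((PySem.List.slice? (aLoop n []) none none (-1)).getD [])

-- ===== PORT B =====
-- bin(n)[2:] as the list of binary digit characters, MSB first (n ≥ 1)
def binDigits (n : Int) : List Char :=
  if n < 2 then ['1']
  else binDigits (PySem.Int.floordiv n 2) ++
       [if PySem.Int.mod n 2 == 1 then '1' else '0']
termination_by n.toNat
decreasing_by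
  rw [PySem.Int.floordiv_eq_ediv_of_pos (by omega)]; omega

-- the body of B's for loop: append 'B', and also 'A' when the bit is '1'
def bStep (acc : List String) (b : Char) : List String :=
  let acc2 := acc ++ ["B"]
  if b == '1' then acc2 ++ ["A"] else acc2

def many_balls_alt (n : Int) : String :=
  if n ≤ 0 then ""
  else String.join (((binDigits n).tail).foldl bStep ["A"])

-- ===== PRECONDITION & SPEC =====
def Spec_many_balls (n : Int) (out : String) : Prop := out = many_balls_alt n
instance (n : Int) (out : String) : Decidable (Spec_many_balls n out) := by unfold Spec_many_balls; infer_instance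

-- ===== CLAIM (what is proved, stated in full; the proofs are below) =====
def Claim_equal_many_balls : Prop := ∀ (n : Int), Dom_many_balls n → Spec_many_balls n (many_balls n)

-- ===== LEMMAS AND PROOFS =====

lemma aLoop_append (k : Nat) : ∀ (n : Int) (acc : List String), n.toNat ≤ k →
    aLoop n acc = acc ++ aLoop n [] := by
  induction k with
  | zero =>
      intro n acc h
      have hn : ¬ 0 < n := by omega
      conv_lhs => rw [aLoop]
      conv_rhs => rw [aLoop]
      simp [hn]
  | succ k ih =>
      intro n acc h
      by_cases hn : 0 < n
      · conv_lhs => rw [aLoop]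
        conv_rhs => rw [aLoop]
        simp only [hn, if_true, List.nil_append]
        by_cases hm : PySem.Int.mod n 2 == 1
        · simp only [hm, if_true]
          rw [ih (n - 1) (acc ++ ["A"]) (by omega), ih (n - 1) (["A"]) (by omega)]
          simp
        · simp only [hm]
          have h2 : PySem.Int.floordiv n 2 = n / 2 :=
            PySem.Int.floordiv_eq_ediv_of_pos (by omega)
          rw [ih (PySem.Int.floordiv n 2) (acc ++ ["B"]) (by rw [h2]; omega),
              ih (PySem.Int.floordiv n 2) (["B"]) (by rw [h2]; omega)]
          simp
      · conv_lhs => rw [aLoop]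
        conv_rhs => rw [aLoop]
        simp [hn]

lemma binDigits_ne_nil (n : Int) : binDigits n ≠ [] := by
  rw [binDigits]
  split <;> simp

lemma main_lemma (k : Nat) : ∀ (n : Int), 0 < n → n.toNat ≤ k →
    (aLoop n []).reverse = ((binDigits n).tail).foldl bStep ["A"] := by
  induction k with
  | zero => intro n h1 h2; omega
  | succ k ih =>
      intro n h1 h2
      have hmod : PySem.Int.mod n 2 = n % 2 := PySem.Int.mod_eq_emod_of_pos (by omega)
      have hdiv : PySem.Int.floordiv n 2 = n / 2 := PySem.Int.floordiv_eq_ediv_of_pos (by omega)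
      by_cases h1' : n = 1
      · subst h1'
        rw [binDigits]
        conv_lhs => rw [aLoop]
        norm_num [hmod, hdiv]
        rw [aLoop]; norm_num
      · -- n ≥ 2
        have hn2 : 2 ≤ n := by omega
        have hrec : binDigits n = binDigits (PySem.Int.floordiv n 2) ++
            [if PySem.Int.mod n 2 == 1 then '1' else '0'] := by
          rw [binDigits]; simp [show ¬ n < 2 by omega]
        obtain ⟨c, t, ht⟩ : ∃ c t, binDigits (PySem.Int.floordiv n 2) = c :: t := by
          cases hbd : binDigits (PySem.Int.floordiv n 2) with
          | nil => exact absurd hbd (binDigits_ne_nil _)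
          | cons c t => exact ⟨c, t, rfl⟩
        rw [hdiv] at ht
        have hihalf : (aLoop (n / 2) []).reverse = ((binDigits (n / 2)).tail).foldl bStep ["A"] := by
          apply ih
          · omega
          · omega
        have htail : ((binDigits (n / 2)).tail).foldl bStep ["A"] = t.foldl bStep ["A"] := by
          rw [ht, List.tail_cons]
        by_cases hodd : n % 2 = 1
        · -- odd case: one 'A' step then one 'B' step on the loop side
          have hm1 : (PySem.Int.mod n 2 == 1) = true := by simp [hodd]
          conv_lhs => rw [aLoop]
          simp only [show (0:Int) < n from by omega, if_true, hm1, List.nil_append]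
          rw [aLoop_append n.toNat (n - 1) ["A"] (by omega)]
          conv_lhs => rw [aLoop]
          simp only [show (0:Int) < n - 1 from by omega, if_true, List.nil_append]
          have hm0 : (PySem.Int.mod (n - 1) 2 == 1) = false := by
            simp; omega
          simp only [hm0, Bool.false_eq_true, if_false]
          rw [aLoop_append n.toNat (PySem.Int.floordiv (n-1) 2) ["B"]
              (by rw [PySem.Int.floordiv_eq_ediv_of_pos (by omega)]; omega)]
          have hhalf : PySem.Int.floordiv (n - 1) 2 = n / 2 := by
            rw [PySem.Int.floordiv_eq_ediv_of_pos (by omega)]; omega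
          rw [hhalf]
          rw [hrec, hdiv, ht]
          simp only [hm1, if_true]
          rw [show (c :: t ++ ['1']).tail = t ++ ['1'] by simp]
          rw [List.foldl_append]
          rw [← htail, ← hihalf]
          simp [bStep]
        · -- even case: one 'B' step on the loop side
          have hm0 : (PySem.Int.mod n 2 == 1) = false := by simp; omega
          conv_lhs => rw [aLoop]
          simp only [show (0:Int) < n from by omega, if_true, hm0, Bool.false_eq_true,
            if_false, List.nil_append]
          rw [aLoop_append n.toNat (PySem.Int.floordiv n 2) ["B"] (by rw [hdiv]; omega)]
          rw [hrec, hdiv, ht]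
          simp only [hm0, Bool.false_eq_true, if_false]
          rw [show (c :: t ++ ['0']).tail = t ++ ['0'] by simp]
          rw [List.foldl_append]
          rw [← htail, ← hihalf]
          simp [bStep]

-- ===== VERDICT (by name: the statement is the Claim_ definition above) =====
theorem many_balls_spec : Claim_equal_many_balls := by
  intro n _
  unfold Spec_many_balls many_balls many_balls_alt
  rw [PySem.List.slice?_none_none_neg_one]
  simp only [Option.getD_some]
  by_cases hn : n ≤ 0
  · rw [aLoop]
    simp [show ¬ 0 < n by omega, hn, String.join]
  · simp only [hn, if_false]
    rw [main_lemma n.toNat n (by omega) (le_refl _)]
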